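-- pv_equiv track=rewrite | github.com/hellproxy/robot-archery | python/combination_counting_archery.py | find_winner
-- ===== SOURCE A (Python) =====
-- from collections import deque
--
-- def find_winner(n_robots, winning_sequence):
--     final_shot = winning_sequence[-1]
--     losing_shots = deque(winning_sequence)
--     robots_still_in = deque(range(n_robots))
--
--     for shot in range(final_shot):
--         # use popleft() and append() to cycle through the robots
--         current_robot = robots_still_in.popleft()
--
--         # if this robot shot the losing shot, it gets removed from the match
--         if shot == losing_shots[0]:
--             losing_shots.popleft()
--         else:
--             robots_still_in.append(current_robot)
--
--     # there should now be only 1 robot remaining, the winner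
--     return robots_still_in.pop()
-- ===== SOURCE B (Python) =====
-- def find_winner(n_robots, winning_sequence):
--     final_shot = winning_sequence[-1]
--     alive = list(range(n_robots))
--     pos = 0
--     t = 0
--     for h in winning_sequence:
--         if h < t or h >= final_shot:
--             break
--         pos = (pos + (h - t)) % len(alive)
--         alive.pop(pos)
--         t = h + 1
--         pos %= len(alive)
--     pos = (pos + max(final_shot - t, 0)) % len(alive)
--     return alive[(pos - 1) % len(alive)]
-- ===== Notes on version B (the rewrite author's own statement) =====
-- stated objective: faster
-- what changed: Instead of simulating every one of the final_shot shots with a rotating deque, B jumps directly from one elimination to the next: it keeps the alive robots in a list with a current-shooter index, advances the index by the shot gap modulo the number of alive robots, removes the eliminated robot by index, and reads the winner off with one final modular step.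
import Mathlib
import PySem

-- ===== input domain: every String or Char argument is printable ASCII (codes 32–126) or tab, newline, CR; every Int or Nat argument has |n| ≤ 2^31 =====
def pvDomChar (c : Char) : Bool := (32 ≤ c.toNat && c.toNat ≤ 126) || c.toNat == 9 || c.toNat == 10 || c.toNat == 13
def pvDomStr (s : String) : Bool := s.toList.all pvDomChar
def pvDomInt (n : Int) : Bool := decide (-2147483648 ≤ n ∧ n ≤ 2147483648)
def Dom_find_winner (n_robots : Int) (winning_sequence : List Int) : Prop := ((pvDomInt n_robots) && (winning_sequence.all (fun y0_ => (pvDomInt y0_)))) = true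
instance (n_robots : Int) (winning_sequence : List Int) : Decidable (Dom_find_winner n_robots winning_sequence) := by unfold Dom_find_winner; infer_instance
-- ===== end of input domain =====

-- B replaces A's shot-by-shot deque simulation (O(final_shot)) by jumping directly between
-- eliminations with modular arithmetic on an index into the alive list (O(k·n) for k eliminations).

-- ===== PORT A =====
-- collections.deque, ported as a two-list queue: front ++ reverse back (O(1) popleft/append)
def pvPopLeft (d : List Int × List Int) : Option (Int × (List Int × List Int)) :=
  match d.1 with
  | r :: f => some (r, (f, d.2))
  | [] =>
    match d.2.reverse with
    | r :: f => some (r, (f, []))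
    | [] => none                                   -- popleft() on an empty deque raises IndexError

def pvAppend (d : List Int × List Int) (r : Int) : List Int × List Int := (d.1, r :: d.2)

def pvPopRight (d : List Int × List Int) : Option Int :=
  match d.2 with
  | r :: _ => some r
  | [] => d.1.getLast?                             -- pop() on an empty deque raises IndexError

-- one iteration of A's `for shot in range(final_shot)` loop; none = the Python raised
def pvAStep (s : Option (List Int × (List Int × List Int))) (shot : Int) :
    Option (List Int × (List Int × List Int)) :=
  match s with
  | none => none
  | some (losing, robots) =>
    match pvPopLeft robots with
    | none => none                                 -- robots_still_in.popleft() raised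
    | some (cur, robots') =>
      match losing with
      | [] => none                                 -- losing_shots[0] raises IndexError
      | l :: lt =>
        if shot = l then some (lt, robots') else some (l :: lt, pvAppend robots' cur)

def find_winner (n_robots : Int) (winning_sequence : List Int) : Int :=
  match PySem.List.pyGet? winning_sequence (-1) with
  | none => 0                                      -- winning_sequence[-1] raises IndexError
  | some final_shot =>
    match (PySem.List.pyRange 0 final_shot 1).foldl pvAStep
        (some (winning_sequence, (PySem.List.pyRange 0 n_robots 1, []))) with
    | none => 0                                    -- the loop raised
    | some (_, robots) => (pvPopRight robots).getD 0   -- robots_still_in.pop()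

-- ===== PORT B =====
-- Source B's `for h in winning_sequence` loop with state (alive, pos, t); early `break` = return state
def pvBLoop (final : Int) : List Int → List Int × Int × Int → List Int × Int × Int
  | [], st => st
  | h :: rest, (alive, pos, t) =>
    if h < t ∨ final ≤ h then (alive, pos, t)
    else
      let p := PySem.Int.mod (pos + (h - t)) (alive.length : Int)
      match PySem.List.pop? alive p with
      | none => (alive, pos, t)                    -- alive.pop(p) raises (alive empty); outside Pre_
      | some (_, alive') =>
          pvBLoop final rest (alive', PySem.Int.mod p (alive'.length : Int), h + 1)

def find_winner_alt (n_robots : Int) (winning_sequence : List Int) : Int :=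
  match PySem.List.pyGet? winning_sequence (-1) with
  | none => 0                                      -- winning_sequence[-1] raises IndexError
  | some final_shot =>
    match pvBLoop final_shot winning_sequence (PySem.List.pyRange 0 n_robots 1, 0, 0) with
    | (alive, pos, t) =>
      let pos2 := PySem.Int.mod (pos + max (final_shot - t) 0) (alive.length : Int)
      (PySem.List.pyGet? alive (PySem.Int.mod (pos2 - 1) (alive.length : Int))).getD 0

-- ===== PRECONDITION & SPEC =====
-- a prefix of the sequence on which every shot eliminates a robot: strictly increasing,
-- starting at or after shot t, with every entry before the final shot
def pvAdmissible (final t : Int) (P : List Int) : Prop :=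
  P.Pairwise (· < ·) ∧ (∀ x ∈ P, x < final) ∧ t ≤ P.headD t

-- A raises (IndexError on an empty deque) exactly when the sequence is empty, there are no
-- robots, or the first n_robots entries each eliminate a robot before the final shot,
-- leaving nobody in; Pre_ excludes exactly those inputs.
def Pre_find_winner (n_robots : Int) (winning_sequence : List Int) : Prop :=
  winning_sequence ≠ [] ∧ 1 ≤ n_robots ∧
    ¬ (n_robots.toNat ≤ winning_sequence.length ∧
        pvAdmissible (winning_sequence.getLastD 0) 0 (winning_sequence.take n_robots.toNat))

instance (n_robots : Int) (winning_sequence : List Int) : Decidable (Pre_find_winner n_robots winning_sequence) := by unfold Pre_find_winner pvAdmissible; infer_instance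

def pvWitness_find_winner : Int × List Int := (3, [0, 1, 2])

def Spec_find_winner (n_robots : Int) (winning_sequence : List Int) (out : Int) : Prop := out = find_winner_alt n_robots winning_sequence
instance (n_robots : Int) (winning_sequence : List Int) (out : Int) : Decidable (Spec_find_winner n_robots winning_sequence out) := by unfold Spec_find_winner; infer_instance

-- ===== CLAIM (what is proved, stated in full; the proofs are below) =====
def Claim_equal_find_winner : Prop := ∀ (n_robots : Int) (winning_sequence : List Int), Dom_find_winner n_robots winning_sequence → Pre_find_winner n_robots winning_sequence → Spec_find_winner n_robots winning_sequence (find_winner n_robots winning_sequence)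

-- ===== LEMMAS AND PROOFS =====

-- number of eliminations A performs, as a recursive count (proof-side only)
def pvElims (final : Int) : List Int → Int → Nat
  | [], _ => 0
  | h :: rest, t => if h < t ∨ final ≤ h then 0 else pvElims final rest (h + 1) + 1

-- the recursive count reaches k exactly when the first k entries form an admissible prefix
lemma pvElims_ge_iff (final : Int) : ∀ (heads : List Int) (t : Int) (k : Nat),
    k ≤ pvElims final heads t ↔ k ≤ heads.length ∧ pvAdmissible final t (heads.take k) := by
  intro heads
  induction heads with
  | nil =>
    intro t k
    simp [pvElims, pvAdmissible]
  | cons h rest ih =>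
    intro t k
    cases k with
    | zero => simp [pvAdmissible]
    | succ k' =>
      rw [List.take_succ_cons]
      by_cases hg : h < t ∨ final ≤ h
      · simp only [pvElims, if_pos hg]
        constructor
        · omega
        · rintro ⟨_, _, hlt, hhd⟩
          have h1 : h < final := hlt h (by simp)
          have h2 : t ≤ h := by simpa using hhd
          omega
      · simp only [pvElims, if_neg hg]
        rw [Nat.succ_le_succ_iff, ih (h+1) k']
        constructor
        · rintro ⟨hlen, hpw, hlt, hhd⟩
          refine ⟨by simpa using hlen, ?_, ?_,
            by have hnt := (not_or.mp hg).1; simp; omega⟩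
          · rw [List.pairwise_cons]
            refine ⟨?_, hpw⟩
            rcases hrt : rest.take k' with _ | ⟨y, ys⟩
            · simp
            · rw [hrt] at hhd hpw
              simp at hhd
              intro b hb
              rcases List.mem_cons.mp hb with h1 | h2
              · omega
              · have := (List.pairwise_cons.mp hpw).1 b h2
                omega
          · intro x hx
            rcases List.mem_cons.mp hx with h1 | h2
            · subst h1; omega
            · exact hlt x h2
        · rintro ⟨hlen, hpw, hlt, _⟩
          rw [List.pairwise_cons] at hpw
          refine ⟨by simpa using hlen, hpw.2, ?_, ?_⟩
          · intro x hx
            exact hlt x (by simp [hx])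
          · rcases hrt : rest.take k' with _ | ⟨y, ys⟩
            · simp
            · have := hpw.1 y (by rw [hrt]; simp)
              simp
              omega


-- the queue representation denotes the deque's contents front to back
def pvDLift (d : List Int × List Int) : List Int := d.1 ++ d.2.reverse

lemma pvPopLeft_lift (d : List Int × List Int) (x : Int) (xs : List Int)
    (h : pvDLift d = x :: xs) :
    ∃ d', pvPopLeft d = some (x, d') ∧ pvDLift d' = xs := by
  rcases d with ⟨f, b⟩
  cases f with
  | cons r f' =>
    simp only [pvDLift, List.cons_append] at h
    injection h with h1 h2
    subst h1
    refine ⟨(f', b), by simp [pvPopLeft], ?_⟩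
    simpa [pvDLift] using h2
  | nil =>
    simp only [pvDLift, List.nil_append] at h
    refine ⟨(xs, []), ?_, ?_⟩
    · simp only [pvPopLeft, h]
    · simp [pvDLift]

lemma pvAppend_lift (d : List Int × List Int) (r : Int) :
    pvDLift (pvAppend d r) = pvDLift d ++ [r] := by
  rcases d with ⟨f, b⟩
  simp [pvDLift, pvAppend]

lemma pvPopRight_lift (d : List Int × List Int) :
    pvPopRight d = (pvDLift d).getLast? := by
  rcases d with ⟨f, b⟩
  cases b with
  | nil => simp [pvPopRight, pvDLift]
  | cons r b' =>
    simp only [pvPopRight, pvDLift]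
    rw [List.getLast?_append_of_ne_nil _ (by simp)]
    simp

-- A's loop on a non-matching stretch of shots only rotates the robots deque
lemma pvA_rot_seg (hd : Int) (tl : List Int) :
    ∀ (n : Nat) (a b : Int) (d : List Int × List Int) (robots : List Int),
    robots ≠ [] → pvDLift d = robots → n = (b - a).toNat →
    (∀ s : Int, a ≤ s → s < b → s ≠ hd) →
    ∃ d', (PySem.List.pyRange a b 1).foldl pvAStep (some (hd :: tl, d)) =
      some (hd :: tl, d') ∧ pvDLift d' = robots.rotate (b - a).toNat := by
  intro n
  induction n with
  | zero =>
    intro a b d robots hr hlift hn hno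
    rw [PySem.List.pyRange_one_eq_nil (by omega), ← hn]
    exact ⟨d, by simp, by rw [List.rotate_zero]; exact hlift⟩
  | succ m ih =>
    intro a b d robots hr hlift hn hno
    have hab : a < b := by omega
    rw [PySem.List.pyRange_one_cons hab]
    rcases robots with _ | ⟨r, rest⟩
    · exact absurd rfl hr
    · obtain ⟨d1, hpop, hlift1⟩ := pvPopLeft_lift d r rest hlift
      have hne : a ≠ hd := hno a le_rfl hab
      have hstep : pvAStep (some (hd :: tl, d)) a = some (hd :: tl, pvAppend d1 r) := by
        simp [pvAStep, hpop, hne]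
      rw [List.foldl_cons, hstep]
      have h1 : rest ++ [r] = (r :: rest).rotate 1 := by
        rw [List.rotate_cons_succ, List.rotate_zero]
      have hlift2 : pvDLift (pvAppend d1 r) = rest ++ [r] := by
        rw [pvAppend_lift, hlift1]
      obtain ⟨d', hfold, hlift'⟩ := ih (a+1) b (pvAppend d1 r) (rest ++ [r]) (by simp)
        hlift2 (by omega) (fun s h1 h2 => hno s (by omega) h2)
      refine ⟨d', hfold, ?_⟩
      rw [hlift', h1, List.rotate_rotate]
      have he2 : 1 + (b - (a+1)).toNat = (b - a).toNat := by omega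
      rw [he2]

-- popping the front of a rotated list = erasing the rotation index and re-rotating
lemma pv_tail_rotate {α : Type} (l : List α) (p : Nat) (hp : p < l.length) :
    (l.rotate p).tail = (l.eraseIdx p).rotate p := by
  have hle : p ≤ l.length := le_of_lt hp
  rw [List.rotate_eq_drop_append_take hle]
  have hdrop : l.drop p = l[p] :: l.drop (p+1) := List.drop_eq_getElem_cons hp
  have herase : l.eraseIdx p = l.take p ++ l.drop (p+1) := List.eraseIdx_eq_take_drop_succ l p
  have hlen : (l.eraseIdx p).length = l.length - 1 := by
    rw [List.length_eraseIdx_of_lt hp]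
  by_cases hcase : p = l.length - 1
  · have hd1 : l.drop (p+1) = [] := by
      apply List.drop_eq_nil_of_le; omega
    rw [hdrop, hd1]
    have h2 : (l.eraseIdx p).rotate p = (l.eraseIdx p).rotate (p % (l.eraseIdx p).length) := (List.rotate_mod _ _).symm
    rw [h2, hlen]
    rcases Nat.eq_zero_or_pos p with h0 | hpos
    · subst h0; simp [herase, hd1]
    · have hm : p % (l.length - 1) = 0 := by rw [hcase]; exact Nat.mod_self _
      rw [hm, List.rotate_zero, herase, hd1]
      simp
  · have hplt : p < l.length - 1 := by omega
    have h2 : (l.eraseIdx p).rotate p = (l.eraseIdx p).drop p ++ (l.eraseIdx p).take p := by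
      apply List.rotate_eq_drop_append_take; omega
    have htlen : (l.take p).length = p := by simp; omega
    rw [h2, herase, List.drop_append_of_le_length (by omega), List.take_append_of_le_length (by omega)]
    rw [hdrop, List.cons_append, List.tail_cons, List.take_take, Nat.min_self,
      show List.drop p (l.take p) = [] from List.drop_eq_nil_of_le (by omega), List.nil_append]

-- the back of a rotated list, as an index into the unrotated list
lemma pv_getLast?_rotate {α : Type} (l : List α) (q : Nat) (hq : q < l.length) :
    (l.rotate q).getLast? = l[(q + l.length - 1) % l.length]? := by
  have hle : q ≤ l.length := le_of_lt hq
  rw [List.rotate_eq_drop_append_take hle]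
  rcases Nat.eq_zero_or_pos q with h0 | hpos
  · subst h0
    have he0 : 0 + l.length - 1 = l.length - 1 := by omega
    have hidx : (0 + l.length - 1) % l.length = l.length - 1 := by
      rw [he0]; exact Nat.mod_eq_of_lt (by omega)
    rw [hidx]
    simp [List.getLast?_eq_getElem?]
  · have hidx : (q + l.length - 1) % l.length = q - 1 := by
      have he : q + l.length - 1 = (q - 1) + l.length := by omega
      rw [he, Nat.add_mod_right]
      exact Nat.mod_eq_of_lt (by omega)
    rw [hidx]
    have htlen : (l.take q).length = q := by simp; omega
    have htake : l.take q ≠ [] := by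
      intro hnil; rw [hnil] at htlen; simp at htlen; omega
    rw [List.getLast?_append_of_ne_nil _ htake]
    rw [List.getLast?_eq_getElem?, htlen]
    rw [List.getElem?_take_of_lt (by omega)]

-- when the final shot is negative, A's loop is empty and B's loop breaks immediately
lemma pvBLoop_neg (final : Int) (hf : final < 0) :
    ∀ (heads : List Int) (alive : List Int) (pos : Int),
    pvBLoop final heads (alive, pos, 0) = (alive, pos, 0) := by
  intro heads alive pos
  cases heads with
  | nil => rfl
  | cons h rest =>
    have : h < 0 ∨ final ≤ h := by omega
    simp [pvBLoop, this]

-- main invariant: A's remaining-shots fold tracks B's elimination loop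
lemma pv_main (final : Int) : ∀ (heads : List Int) (t : Int) (alive : List Int) (pos : Nat)
    (d : List Int × List Int),
    alive ≠ [] → pos < alive.length → t ≤ final →
    pvElims final heads t < alive.length →
    heads.getLast? = some final →
    pvDLift d = alive.rotate pos →
    ∃ (alive' : List Int) (pos' : Nat) (t' : Int) (losing' : List Int)
      (d' : List Int × List Int),
      pvBLoop final heads (alive, (pos : Int), t) = (alive', ((pos' : Nat) : Int), t')
      ∧ alive' ≠ [] ∧ pos' < alive'.length ∧ t' ≤ final
      ∧ (PySem.List.pyRange t final 1).foldl pvAStep (some (heads, d))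
          = some (losing', d')
      ∧ pvDLift d' = alive'.rotate (pos' + (final - t').toNat) := by
  intro heads
  induction heads with
  | nil => intro t alive pos d _ _ _ _ hlast; simp at hlast
  | cons h rest ih =>
    intro t alive pos d hne hpos ht helims hlast hlift
    by_cases hbr : h < t ∨ final ≤ h
    · have hrne : alive.rotate pos ≠ [] := by
        simp [List.rotate_eq_nil_iff]; exact hne
      obtain ⟨d', hfold, hlift'⟩ := pvA_rot_seg h rest (final - t).toNat t final d
        (alive.rotate pos) hrne hlift rfl (fun s h1 h2 => by omega)
      refine ⟨alive, pos, t, h :: rest, d', ?_, hne, hpos, ht, hfold, ?_⟩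
      · simp [pvBLoop, hbr]
      · rw [hlift', List.rotate_rotate]
    · rcases not_or.mp hbr with ⟨hth', hhf'⟩
      have hth : t ≤ h := by omega
      have hhf : h < final := by omega
      have hL : 0 < alive.length := List.length_pos_of_ne_nil hne
      have hguard : ¬ (h < t ∨ final ≤ h) := by omega
      have helim1 : pvElims final rest (h+1) + 1 < alive.length := by
        have he : pvElims final (h :: rest) t = pvElims final rest (h+1) + 1 := by
          simp [pvElims, hguard]
        omega
      have hL2 : 2 ≤ alive.length := by omega
      have hm : (pos + (h - t).toNat) % alive.length < alive.length := Nat.mod_lt _ hL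
      set m : Nat := (pos + (h - t).toNat) % alive.length with hmdef
      have hpInt : PySem.Int.mod ((pos:Int) + (h - t)) ((alive.length:Nat):Int) = ((m:Nat):Int) := by
        have hc : (pos:Int) + (h - t) = ((pos + (h-t).toNat : Nat) : Int) := by push_cast; omega
        rw [hc, PySem.Int.mod_natCast]
      have hpop : PySem.List.pop? alive ((m:Nat):Int) = some (alive[m], alive.eraseIdx m) :=
        PySem.List.pop?_natCast alive m hm
      have hlen1 : (alive.eraseIdx m).length = alive.length - 1 := List.length_eraseIdx_of_lt hm
      have hm1 : m % (alive.length - 1) < alive.length - 1 := Nat.mod_lt _ (by omega)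
      have hposInt : PySem.Int.mod ((m:Nat):Int) (((alive.eraseIdx m).length:Nat):Int)
          = ((m % (alive.length - 1) : Nat):Int) := by
        rw [hlen1]; exact_mod_cast PySem.Int.mod_natCast m (alive.length - 1)
      have hrest : rest.getLast? = some final := by
        cases rest with
        | nil => simp at hlast; omega
        | cons x xs => rw [← hlast, List.getLast?_cons_cons]
      -- first stretch: rotate up to shot h
      have hrne : alive.rotate pos ≠ [] := by
        simp [List.rotate_eq_nil_iff]; exact hne
      obtain ⟨d1, hfold1, hlift1⟩ := pvA_rot_seg h rest (h - t).toNat t h d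
        (alive.rotate pos) hrne hlift rfl (fun s h1 h2 => by omega)
      rw [List.rotate_rotate] at hlift1
      have hrotm : alive.rotate (pos + (h - t).toNat) = alive.rotate m := (List.rotate_mod _ _).symm
      rw [hrotm] at hlift1
      -- the elimination step at shot h
      have hrotne : alive.rotate m ≠ [] := by
        simp [List.rotate_eq_nil_iff]; exact hne
      rcases hx : alive.rotate m with _ | ⟨r, rr⟩
      · exact absurd hx hrotne
      obtain ⟨d2, hpop2, hlift2⟩ := pvPopLeft_lift d1 r rr (by rw [hlift1, hx])
      have hstep : pvAStep (some (h :: rest, d1)) h = some (rest, d2) := by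
        simp [pvAStep, hpop2]
      have hlift3 : pvDLift d2 = (alive.eraseIdx m).rotate (m % (alive.length - 1)) := by
        rw [hlift2]
        have : rr = (alive.rotate m).tail := by rw [hx]; rfl
        rw [this, pv_tail_rotate alive m hm]
        conv_lhs => rw [← List.rotate_mod]
        rw [hlen1]
      obtain ⟨alive', pos', t', losing', d', hB, hne', hpos', ht', hA, hlift'⟩ :=
        ih (h+1) (alive.eraseIdx m) (m % (alive.length - 1)) d2
          (by intro hnil; rw [hnil] at hlen1; simp at hlen1; omega)
          (by omega) (by omega) (by omega) hrest hlift3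
      refine ⟨alive', pos', t', losing', d', ?_, hne', hpos', ht', ?_, hlift'⟩
      · show pvBLoop final (h :: rest) (alive, (pos:Int), t) = _
        simp only [pvBLoop, if_neg hguard]
        rw [hpInt, hpop]
        simp only []
        rw [hposInt]
        exact hB
      · rw [PySem.List.pyRange_one_append t h final hth (le_of_lt hhf)]
        rw [List.foldl_append, hfold1]
        rw [PySem.List.pyRange_one_cons (by omega : h < final), List.foldl_cons, hstep]
        exact hA

-- ===== VERDICT (by name: the statement is the Claim_ definition above) =====
lemma pv_idx_neg_one (L : Nat) (hL : 0 < L) :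
    PySem.Int.mod (0 - 1) ((L : Nat) : Int) = (((L - 1 : Nat) : Nat) : Int) := by
  rw [PySem.Int.mod_eq_emod_of_pos (by omega)]
  have h1 : (0 - 1 : Int) = ((L : Int) - 1) + (L : Int) * (-1) := by ring
  rw [h1, Int.add_mul_emod_self_left, Int.emod_eq_of_lt (by omega) (by omega)]
  omega

lemma pv_idx_back (L q : Nat) (hq : q < L) :
    PySem.Int.mod ((q : Int) - 1) ((L : Nat) : Int) = (((q + L - 1) % L : Nat) : Int) := by
  rcases Nat.eq_zero_or_pos q with h0 | hpos
  · subst h0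
    have h01 : 0 + L - 1 = L - 1 := by omega
    have hc0 : ((0:Nat):Int) - 1 = (0:Int) - 1 := by simp
    rw [h01, Nat.mod_eq_of_lt (by omega), hc0]
    exact pv_idx_neg_one L (by omega)
  · have hc : (q : Int) - 1 = ((q - 1 : Nat) : Int) := by omega
    rw [hc, PySem.Int.mod_natCast]
    congr 1
    have he : q + L - 1 = (q - 1) + L := by omega
    rw [he, Nat.add_mod_right, Nat.mod_eq_of_lt (by omega)]

theorem find_winner_spec : Claim_equal_find_winner := by
  intro n ws _ hpre
  obtain ⟨hws, hn, hnadm⟩ := hpre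
  unfold Spec_find_winner find_winner find_winner_alt
  have hlast : ws.getLast? = some (ws.getLastD 0) := by
    cases hw : ws.getLast? with
    | none => exact absurd (List.getLast?_eq_none_iff.mp hw) hws
    | some v => rw [List.getLastD_eq_getLast?, hw]; rfl
  rw [PySem.List.pyGet?_neg_one, hlast]
  dsimp only
  set final := ws.getLastD 0 with hfinal
  have helims : pvElims final ws 0 < n.toNat := by
    by_contra hcon
    have hge : n.toNat ≤ pvElims final ws 0 := by omega
    rw [pvElims_ge_iff] at hge
    exact hnadm hge
  set robots := PySem.List.pyRange 0 n 1 with hrobots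
  have hlen : robots.length = n.toNat := by
    rw [hrobots, PySem.List.length_pyRange_one]; congr 1; omega
  have hLpos : 0 < robots.length := by omega
  have hrne : robots ≠ [] := by
    intro hnil; rw [hnil] at hLpos; simp at hLpos
  by_cases h0 : 0 ≤ final
  · obtain ⟨alive', pos', t', losing', d', hB, hne', hpos', ht', hA, hlift'⟩ :=
      pv_main final ws 0 robots 0 (robots, []) hrne hLpos h0 (by omega) hlast
        (by simp [pvDLift])
    rw [Nat.cast_zero] at hB
    rw [hA, hB]
    dsimp only
    rw [pvPopRight_lift, hlift']
    set L' := alive'.length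
    have hL' : 0 < L' := List.length_pos_of_ne_nil hne'
    set K : Nat := pos' + (final - t').toNat with hK
    set q : Nat := K % L' with hq
    have hqlt : q < L' := Nat.mod_lt _ hL'
    -- A's side
    have hrotK : alive'.rotate K = alive'.rotate q := (List.rotate_mod _ _).symm
    rw [hrotK, pv_getLast?_rotate alive' q hqlt]
    -- B's side
    have hmax : max (final - t') 0 = final - t' := max_eq_left (by omega)
    have hcast : (pos' : Int) + (final - t') = ((K : Nat) : Int) := by
      rw [hK]; push_cast; omega
    rw [hmax, hcast, PySem.Int.mod_natCast, ← hq, pv_idx_back L' q hqlt,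
      PySem.List.pyGet?_natCast]
  · -- negative final shot: A's loop is empty, B's loop breaks at once
    rw [PySem.List.pyRange_one_eq_nil (by omega), List.foldl_nil]
    rw [pvBLoop_neg final (by omega) ws robots 0]
    dsimp only
    rw [pvPopRight_lift]
    have hliftr : pvDLift (robots, []) = robots := by simp [pvDLift]
    rw [hliftr]
    have hmax : max (final - 0) 0 = 0 := max_eq_right (by omega)
    have hz : PySem.Int.mod ((0:Int) + 0) ((robots.length : Nat) : Int) = 0 := by
      rw [show ((0:Int) + 0) = ((0:Nat):Int) by omega, PySem.Int.mod_natCast]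
      simp
    rw [hmax, hz, pv_idx_neg_one robots.length hLpos, PySem.List.pyGet?_natCast]
    rw [List.getLast?_eq_getElem?]
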